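-- pv_equiv track=rewrite | github.com/awindmann/Industrial-AI-Robustness-Card | reporting/builder.py | _resolve_primary_metric
-- ===== SOURCE A (Python) =====
-- from typing import Dict, Iterable, List, Tuple, Optional, Sequence
--
-- LOSS_KEYS = ("loss_fn", "loss_function", "criterion", "loss", "objective", "test_metric")
--
-- def _match_metric_name(candidates: Iterable[str], target: str | None) -> Optional[str]:
--     if not target:
--         return None
--     target_key = str(target).strip().lower()
--     if not target_key:
--         return None
--     for name in candidates:
--         if str(name).strip().lower() == target_key:
--             return name
--     return None
--
-- def _sorted_metric_names(names: Iterable[str]) -> List[str]: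
--     return sorted({str(name) for name in names if name}, key=lambda value: value.lower())
--
-- def _resolve_primary_metric(
--     metric_summary: Dict[str, Dict[str, float]],
--     params: Dict[str, str],
--     tags: Dict[str, str],
-- ) -> Optional[str]:
--     if not metric_summary:
--         return None
--     metric_names = list(metric_summary.keys())
--     loss_candidates = []
--     for key in LOSS_KEYS:
--         candidate = params.get(key) or tags.get(key)
--         if candidate:
--             loss_candidates.append(candidate)
--     for candidate in loss_candidates:
--         match = _match_metric_name(metric_names, candidate)
--         if match:
--             return match
--     sorted_names = _sorted_metric_names(metric_names)
--     return sorted_names[0] if sorted_names else None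
-- ===== SOURCE B (Python) =====
-- LOSS_KEYS = ("loss_fn", "loss_function", "criterion", "loss", "objective", "test_metric")
--
-- def _resolve_primary_metric(metric_summary, params, tags):
--     # Loop order inverted: instead of trying each loss candidate against the
--     # metric-name list, build the ordered rank table of normalized candidate
--     # keys once, then make ONE pass over the metric names tracking both the
--     # best (lowest-rank, earliest) matching name and the case-insensitive
--     # minimum name for the alphabetical fallback.
--     ranks = {}
--     for key in LOSS_KEYS:
--         candidate = params.get(key) or tags.get(key)
--         if candidate:
--             k = str(candidate).strip().lower()
--             if k and k not in ranks:
--                 ranks[k] = len(ranks)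
--     best_rank = None
--     best_name = None
--     fallback = None
--     for name in metric_summary:
--         r = ranks.get(str(name).strip().lower())
--         if r is not None and (best_rank is None or r < best_rank):
--             best_rank = r
--             best_name = name
--         if name and (fallback is None or str(name).lower() < fallback.lower()):
--             fallback = str(name)
--     return best_name if best_rank is not None else fallback
-- ===== Notes on version B (the rewrite author's own statement) =====
-- stated objective: alternative
-- what changed: Inverts the loop nesting: instead of scanning the metric-name list once per loss candidate and then sorting for the fallback, B builds an ordered rank table of normalized candidate keys and makes a single pass over the metric names, tracking both the best-ranked (earliest) matching name and the running case-insensitive minimum name.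
-- outside the precondition, e.g. on _resolve_primary_metric({'A': {}, 'a': {}}, {}, {}): A returns 'a', B returns 'A'; on _resolve_primary_metric({'B': {}, 'b': {}, 'a': {}}, {}, {}): A returns 'a', B returns 'a'
import Mathlib
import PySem

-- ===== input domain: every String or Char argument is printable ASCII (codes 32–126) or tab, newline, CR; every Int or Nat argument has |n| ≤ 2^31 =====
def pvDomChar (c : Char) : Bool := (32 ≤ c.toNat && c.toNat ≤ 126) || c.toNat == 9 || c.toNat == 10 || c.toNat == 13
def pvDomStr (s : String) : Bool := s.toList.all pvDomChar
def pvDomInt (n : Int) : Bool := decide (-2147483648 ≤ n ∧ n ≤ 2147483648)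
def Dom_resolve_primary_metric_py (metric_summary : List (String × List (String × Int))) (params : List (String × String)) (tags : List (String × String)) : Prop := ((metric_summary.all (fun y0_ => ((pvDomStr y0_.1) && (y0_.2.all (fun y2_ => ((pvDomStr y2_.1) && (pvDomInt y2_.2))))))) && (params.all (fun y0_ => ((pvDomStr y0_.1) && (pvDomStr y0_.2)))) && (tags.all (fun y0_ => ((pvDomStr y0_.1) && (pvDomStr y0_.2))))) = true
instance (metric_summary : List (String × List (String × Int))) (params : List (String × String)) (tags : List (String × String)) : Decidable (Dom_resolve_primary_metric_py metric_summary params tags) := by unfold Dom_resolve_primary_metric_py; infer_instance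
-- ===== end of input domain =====

-- B inverts the loop nesting: a rank table of normalized loss-candidate keys is built once and ONE pass
-- over the metric names tracks both the best-ranked matching name and the running case-insensitive
-- minimum name for the fallback (no sort, no per-candidate rescan); objective: alternative.

-- shared primitive helpers (both Pythons use the same module constant and the same built-in steps)
def pvLossKeys : List String := ["loss_fn", "loss_function", "criterion", "loss", "objective", "test_metric"]
def pvNorm (s : String) : String := PySem.Str.lower (PySem.Str.strip s)
def pvGet (d : List (String × String)) (k : String) : Option String :=
  (d.find? (fun p => p.1 == k)).map (·.2)
def pvOrGet (params tags : List (String × String)) (k : String) : Option String :=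
  match pvGet params k with
  | some v => if v = "" then pvGet tags k else some v
  | none => pvGet tags k

-- ===== PORT A =====
def pvMatchMetricName (candidates : List String) (target : Option String) : Option String :=
  match target with
  | none => none
  | some t =>
    if t = "" then none
    else
      let targetKey := pvNorm t
      if targetKey = "" then none
      else candidates.find? (fun name => pvNorm name == targetKey)

def pvSortedMetricNames (names : List String) : List String :=
  PySem.List.sorted (PySem.Set.ofList (names.filter (fun n => n ≠ ""))) (fun v => PySem.Str.lower v) false

def resolve_primary_metric_py (metric_summary : List (String × List (String × Int))) (params : List (String × String)) (tags : List (String × String)) : Option String :=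
  if metric_summary.isEmpty then none
  else
    let metricNames : List String := PySem.Set.ofList (metric_summary.map (·.1))
    let lossCandidates : List String := pvLossKeys.foldl (fun acc key =>
        match pvOrGet params tags key with
        | some c => if c ≠ "" then acc ++ [c] else acc
        | none => acc) []
    let firstMatch : Option String := lossCandidates.foldl (fun acc candidate =>
        match acc with
        | some _ => acc
        | none =>
          match pvMatchMetricName metricNames (some candidate) with
          | some m => if m ≠ "" then some m else none
          | none => none) none
    match firstMatch with
    | some m => some m
    | none =>
      match pvSortedMetricNames metricNames with
      | [] => none
      | x :: _ => some x

-- ===== PORT B =====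
def resolve_primary_metric_py_alt (metric_summary : List (String × List (String × Int))) (params : List (String × String)) (tags : List (String × String)) : Option String :=
  let ranks : PySem.Dict String Int := pvLossKeys.foldl (fun d key =>
      match pvOrGet params tags key with
      | some candidate =>
        if candidate ≠ "" then
          if pvNorm candidate ≠ "" ∧ d.contains (pvNorm candidate) = false
          then d.insert (pvNorm candidate) (d.size : Int) else d
        else d
      | none => d) PySem.Dict.empty
  let st : Option Int × Option String × Option String :=
    (PySem.Set.ofList (metric_summary.map (·.1))).foldl (fun st name =>
      let st1 : Option Int × Option String × Option String :=
        match ranks.get? (pvNorm name), st.1 with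
        | some r, none => (some r, some name, st.2.2)
        | some r, some b => if r < b then (some r, some name, st.2.2) else st
        | none, _ => st
      if name ≠ "" ∧ (st1.2.2.all fun f => decide (PySem.Str.lower name < PySem.Str.lower f)) = true
      then (st1.1, st1.2.1, some name) else st1) (none, none, none)
  match st.1 with
  | some _ => st.2.1
  | none => st.2.2

-- ===== PRECONDITION & SPEC =====
-- Pre_ excludes metric summaries whose distinct names contain a case-insensitive duplicate: on those,
-- when no loss candidate matches, A's alphabetical tie-break depends on Python's hash-dependent set
-- iteration order, which is not a specified value (B's first-minimum scan would depend on it the same way).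
def Pre_resolve_primary_metric_py (metric_summary : List (String × List (String × Int))) (params : List (String × String)) (tags : List (String × String)) : Prop :=
  ((PySem.Set.ofList (metric_summary.map (·.1))).map (fun s => PySem.Str.lower s)).Nodup

instance (metric_summary : List (String × List (String × Int))) (params : List (String × String)) (tags : List (String × String)) : Decidable (Pre_resolve_primary_metric_py metric_summary params tags) := by unfold Pre_resolve_primary_metric_py; infer_instance

def pvWitness_resolve_primary_metric_py : (List (String × List (String × Int))) × (List (String × String)) × (List (String × String)) :=
  ([("Loss", [("a", 1)]), ("acc", [])], [("loss", "loss")], [])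

def Spec_resolve_primary_metric_py (metric_summary : List (String × List (String × Int))) (params : List (String × String)) (tags : List (String × String)) (out : Option String) : Prop := out = resolve_primary_metric_py_alt metric_summary params tags
instance (metric_summary : List (String × List (String × Int))) (params : List (String × String)) (tags : List (String × String)) (out : Option String) : Decidable (Spec_resolve_primary_metric_py metric_summary params tags out) := by unfold Spec_resolve_primary_metric_py; infer_instance

-- ===== CLAIM (what is proved, stated in full; the proofs are below) =====
def Claim_equal_resolve_primary_metric_py : Prop := ∀ (metric_summary : List (String × List (String × Int))) (params : List (String × String)) (tags : List (String × String)), Dom_resolve_primary_metric_py metric_summary params tags → Pre_resolve_primary_metric_py metric_summary params tags → Spec_resolve_primary_metric_py metric_summary params tags (resolve_primary_metric_py metric_summary params tags)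

-- ===== LEMMAS AND PROOFS =====

-- ---- generic list lemmas (reused machinery) ----
theorem pv_find?_foldl_add {α : Type} [BEq α] [LawfulBEq α] (p : α → Bool) (l : List α) :
    ∀ s : List α, ((l.foldl PySem.Set.add s).find? p) = (s.find? p).or (l.find? p) := by
  induction l with
  | nil => intro s; cases h : s.find? p <;> simp [h]
  | cons x t ih =>
    intro s
    simp only [List.foldl_cons]
    rw [ih]
    unfold PySem.Set.add
    by_cases hx : PySem.Set.contains s x = true
    · have hmem : x ∈ s := by simpa [PySem.Set.contains] using hx
      simp only [hx, if_true]
      cases hs : s.find? p with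
      | some v => simp
      | none =>
        have hpx : p x = false := by
          have := List.find?_eq_none.mp hs x hmem
          simpa using this
        simp [hpx]
    · rw [if_neg hx, List.find?_append]
      cases hs : s.find? p with
      | some v => simp
      | none =>
        simp only [Option.none_or]
        cases hpx : p x <;> simp [hpx]

theorem pv_find?_ofList {α : Type} [BEq α] [LawfulBEq α] (p : α → Bool) (l : List α) :
    (PySem.Set.ofList l).find? p = l.find? p := by
  rw [PySem.Set.ofList_eq_foldl, pv_find?_foldl_add]; simp

theorem pv_findSome?_eq_find?_bind {α β : Type} (f : α → Option β) (l : List α) :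
    l.findSome? f = (l.find? (fun x => (f x).isSome)).bind f := by
  induction l with
  | nil => simp
  | cons x t ih =>
    cases h : f x with
    | some b =>
      rw [List.findSome?_cons, h, List.find?_cons_of_pos (by simp [h])]
      simp [h]
    | none =>
      rw [List.findSome?_cons, h, List.find?_cons_of_neg (by simp [h])]
      exact ih

theorem pv_findSome?_ofList {α : Type} [BEq α] [LawfulBEq α] {β : Type} (f : α → Option β) (l : List α) :
    (PySem.Set.ofList l).findSome? f = l.findSome? f := by
  rw [pv_findSome?_eq_find?_bind, pv_findSome?_eq_find?_bind, pv_find?_ofList]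

theorem pv_filter_add {α : Type} [BEq α] [LawfulBEq α] (p : α → Bool) (s : List α) (x : α) :
    (PySem.Set.add s x).filter p = if p x then PySem.Set.add (s.filter p) x else s.filter p := by
  unfold PySem.Set.add
  by_cases hx : PySem.Set.contains s x = true
  · have hmem : x ∈ s := by simpa [PySem.Set.contains] using hx
    rw [if_pos hx]
    cases hpx : p x with
    | true =>
      have hcf : PySem.Set.contains (s.filter p) x = true := by
        simp [PySem.Set.contains, List.mem_filter, hmem, hpx]
      rw [if_pos rfl, if_pos hcf]
    | false => simp
  · have hmem : x ∉ s := by simpa [PySem.Set.contains] using hx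
    rw [if_neg hx, List.filter_append]
    cases hpx : p x with
    | true =>
      have hcf : ¬ PySem.Set.contains (s.filter p) x = true := by
        simp [PySem.Set.contains, List.mem_filter]
        intro h; exact absurd h hmem
      rw [if_pos rfl, if_neg hcf]
      simp [hpx]
    | false => simp [hpx]

theorem pv_filter_foldl_add {α : Type} [BEq α] [LawfulBEq α] (p : α → Bool) (l : List α) :
    ∀ s : List α, (l.foldl PySem.Set.add s).filter p = (l.filter p).foldl PySem.Set.add (s.filter p) := by
  induction l with
  | nil => intro s; simp
  | cons x t ih =>
    intro s
    simp only [List.foldl_cons, List.filter_cons]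
    rw [ih, pv_filter_add]
    cases hpx : p x with
    | true => simp
    | false => simp

theorem pv_filter_ofList {α : Type} [BEq α] [LawfulBEq α] (p : α → Bool) (l : List α) :
    (PySem.Set.ofList l).filter p = PySem.Set.ofList (l.filter p) := by
  rw [PySem.Set.ofList_eq_foldl, PySem.Set.ofList_eq_foldl, pv_filter_foldl_add]
  simp

-- named loop steps (so fold lemmas rewrite across declarations)
def pvEarlyStep {α β : Type} (f : α → Option β) (acc : Option β) (x : α) : Option β :=
  match acc with | some _ => acc | none => f x

def pvAppendStep {α β : Type} (g : α → Option β) (acc : List β) (x : α) : List β :=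
  match g x with | some c => acc ++ [c] | none => acc

theorem pv_foldl_orelse {α β : Type} (f : α → Option β) (l : List α) :
    ∀ acc : Option β, (l.foldl (pvEarlyStep f) acc) = acc.or (l.findSome? f) := by
  induction l with
  | nil => intro acc; cases acc <;> simp
  | cons x t ih =>
    intro acc
    cases acc with
    | some v =>
      simp only [List.foldl_cons, pvEarlyStep]
      rw [ih]
      simp
    | none =>
      simp only [List.foldl_cons, pvEarlyStep]
      rw [ih, List.findSome?_cons]
      cases f x <;> simp

theorem pv_foldl_early {α β : Type} (f : α → Option β) (l : List α) :
    l.foldl (pvEarlyStep f) none = l.findSome? f := by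
  rw [pv_foldl_orelse]; simp

theorem pv_foldl_append_filterMap {α β : Type} (g : α → Option β) (l : List α) :
    ∀ acc : List β, (l.foldl (pvAppendStep g) acc) = acc ++ l.filterMap g := by
  induction l with
  | nil => intro acc; simp
  | cons x t ih =>
    intro acc
    simp only [List.foldl_cons, List.filterMap_cons, pvAppendStep]
    cases hg : g x <;> simp [ih]

theorem pv_findSome?_filterMap {α β γ : Type} (g : α → Option β) (m : β → Option γ) (l : List α) :
    (l.filterMap g).findSome? m = l.findSome? (fun x => (g x).bind m) := by
  induction l with
  | nil => simp
  | cons x t ih =>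
    simp only [List.filterMap_cons]
    cases hg : g x with
    | none => simp [hg, ih]
    | some b =>
      simp only [List.findSome?_cons, hg]
      cases hm : m b <;> simp [hm, ih]

theorem pv_head_sorted_eq_min? (zs : List String)
    (h : (zs.map (fun v => PySem.Str.lower v)).Nodup) :
    (PySem.List.sorted zs (fun v => PySem.Str.lower v) false).head? = PySem.List.min? zs (fun v => PySem.Str.lower v) := by
  cases hz : PySem.List.sorted zs (fun v => PySem.Str.lower v) false with
  | nil =>
    have hnil : zs = [] := (PySem.List.sorted_eq_nil_iff _ _ _).mp hz
    subst hnil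
    exact ((PySem.List.min?_eq_none_iff _ _).mpr rfl).symm
  | cons y t =>
    have hzne : zs ≠ [] := by
      intro hnil; subst hnil
      simp [PySem.List.sorted] at hz
    obtain ⟨m, hm⟩ : ∃ m, PySem.List.min? zs (fun v => PySem.Str.lower v) = some m := by
      cases hmin : PySem.List.min? zs (fun v => PySem.Str.lower v) with
      | none => exact absurd ((PySem.List.min?_eq_none_iff _ _).mp hmin) hzne
      | some m => exact ⟨m, rfl⟩
    rw [hm]
    have hy_mem : y ∈ zs := by
      have : y ∈ PySem.List.sorted zs (fun v => PySem.Str.lower v) false := by rw [hz]; exact List.mem_cons_self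
      exact (PySem.List.mem_sorted _ _ _ _).mp this
    have hm_mem : m ∈ zs := PySem.List.min?_mem hm
    have h1 : PySem.Str.lower m ≤ PySem.Str.lower y := PySem.List.min?_isMin hm y hy_mem
    have h2 : PySem.Str.lower y ≤ PySem.Str.lower m := by
      have hp := PySem.List.sorted_pairwise (xs := zs) (key := fun v => PySem.Str.lower v)
      rw [hz] at hp
      have hms : m ∈ PySem.List.sorted zs (fun v => PySem.Str.lower v) false := (PySem.List.mem_sorted _ _ _ _).mpr hm_mem
      rw [hz] at hms
      rcases List.mem_cons.mp hms with hmy | hmt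
      · rw [hmy]
      · exact (List.pairwise_cons.mp hp).1 m hmt
    have hkey : PySem.Str.lower y = PySem.Str.lower m := le_antisymm h2 h1
    have : y = m := List.inj_on_of_nodup_map h hy_mem hm_mem hkey
    simp [this]

theorem pvNorm_empty : pvNorm "" = "" := by decide

-- ---- proof helpers naming the two Pythons' intermediate loops ----
def pvCandF (params tags : List (String × String)) (k : String) : Option String :=
  match pvOrGet params tags k with
  | some c => if c ≠ "" then some c else none
  | none => none

def pvMatchF (names : List String) (c : String) : Option String :=
  match pvMatchMetricName names (some c) with
  | some m => if m ≠ "" then some m else none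
  | none => none

def pvEF (params tags : List (String × String)) (key : String) : Option String :=
  (pvCandF params tags key).bind (fun c => if pvNorm c = "" then none else some (pvNorm c))

def pvKS (params tags : List (String × String)) : List String := pvLossKeys.filterMap (pvEF params tags)

-- index of the first occurrence, as a Python int
def pvIdxI (s : String) : List String → Option Int
  | [] => none
  | c :: t => if c = s then some 0 else (pvIdxI s t).map (· + 1)

-- B's rank-table loop step, with the candidate extraction abstracted
def pvRankStep (f : String → Option String) (d : PySem.Dict String Int) (key : String) : PySem.Dict String Int :=
  match f key with
  | some k => if d.contains k = false then d.insert k (d.size : Int) else d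
  | none => d

-- B's single-pass scan, split into its independent components
def pvSingle (g : String → Option Int) (n : String) : Option (Int × String) := (g n).map (fun r => (r, n))

def pvMerge (x y : Option (Int × String)) : Option (Int × String) :=
  match x, y with
  | none, y => y
  | some p, none => some p
  | some p, some q => if q.1 < p.1 then some q else some p

def pvBestR (g : String → Option Int) : List String → Option (Int × String)
  | [] => none
  | n :: t => pvMerge (pvSingle g n) (pvBestR g t)

def pvFbStep (fb : Option String) (n : String) : Option String :=
  if n ≠ "" ∧ (fb.all fun f => decide (PySem.Str.lower n < PySem.Str.lower f)) = true then some n else fb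

def pvFb (names : List String) (fb : Option String) : Option String := names.foldl pvFbStep fb

def pvMin2 (fb : Option String) (n : String) : Option String :=
  if (fb.all fun f => decide (PySem.Str.lower n < PySem.Str.lower f)) = true then some n else fb

def pvScanStep (g : String → Option Int) (st : Option Int × Option String × Option String) (name : String) : Option Int × Option String × Option String :=
  let st1 : Option Int × Option String × Option String :=
    match g name, st.1 with
    | some r, none => (some r, some name, st.2.2)
    | some r, some b => if r < b then (some r, some name, st.2.2) else st
    | none, _ => st
  if name ≠ "" ∧ (st1.2.2.all fun f => decide (PySem.Str.lower name < PySem.Str.lower f)) = true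
  then (st1.1, st1.2.1, some name) else st1

-- ---- pvIdxI facts ----
theorem pvIdxI_nonneg (s : String) : ∀ (l : List String) (r : Int), pvIdxI s l = some r → 0 ≤ r := by
  intro l
  induction l with
  | nil => intro r h; simp [pvIdxI] at h
  | cons c t ih =>
    intro r h
    by_cases hc : c = s
    · simp [pvIdxI, hc] at h; omega
    · simp only [pvIdxI, if_neg hc] at h
      cases ht : pvIdxI s t with
      | none => rw [ht] at h; simp at h
      | some r' =>
        rw [ht] at h
        simp at h
        have := ih r' ht
        omega

theorem pvIdxI_eq_none_iff (s : String) : ∀ l : List String, pvIdxI s l = none ↔ s ∉ l := by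
  intro l
  induction l with
  | nil => simp [pvIdxI]
  | cons c t ih =>
    by_cases hc : c = s
    · simp [pvIdxI, hc]
    · simp only [pvIdxI, if_neg hc]
      cases ht : pvIdxI s t with
      | none =>
        have h1 := ih.mp ht
        constructor
        · intro _ hm
          rcases List.mem_cons.mp hm with h | h
          · exact hc h.symm
          · exact h1 h
        · intro _; rfl
      | some r =>
        have : s ∈ t := by by_contra hmem; rw [ih.mpr hmem] at ht; simp at ht
        simp [this]

theorem pvIdxI_append_single (s x : String) : ∀ l : List String,
    pvIdxI s (l ++ [x]) = (pvIdxI s l).or (if x = s then some (l.length : Int) else none) := by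
  intro l
  induction l with
  | nil =>
    simp only [List.nil_append, pvIdxI]
    by_cases hx : x = s <;> simp [hx]
  | cons c t ih =>
    simp only [List.cons_append, pvIdxI]
    by_cases hc : c = s
    · simp [hc]
    · rw [if_neg hc, if_neg hc, ih]
      cases ht : pvIdxI s t with
      | some r => simp
      | none =>
        by_cases hx : x = s
        · simp [hx]
          try push_cast
          try ring
        · simp [hx]

-- ---- the rank table is the first-occurrence index over the deduped candidate keys ----
theorem pv_ranks (f : String → Option String) (ks : List String) :
    ∀ (d : PySem.Dict String Int) (l : List String),
      (∀ s, d.get? s = pvIdxI s l) → d.size = l.length →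
      (∀ s, (ks.foldl (pvRankStep f) d).get? s = pvIdxI s ((ks.filterMap f).foldl PySem.Set.add l))
      ∧ (ks.foldl (pvRankStep f) d).size = ((ks.filterMap f).foldl PySem.Set.add l).length := by
  induction ks with
  | nil => intro d l h1 h2; exact ⟨h1, h2⟩
  | cons key kt ih =>
    intro d l h1 h2
    simp only [List.foldl_cons, List.filterMap_cons, pvRankStep]
    cases hf : f key with
    | none => exact ih d l h1 h2
    | some k =>
      simp only [List.foldl_cons]
      by_cases hc : d.contains k = false
      · have hkl : k ∉ l := by
          rw [← pvIdxI_eq_none_iff k l, ← h1 k]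
          cases hg : d.get? k with
          | none => rfl
          | some v =>
            exfalso
            have : d.contains k = true := by rw [PySem.Dict.contains_eq_isSome_get?, hg]; rfl
            rw [this] at hc; exact Bool.noConfusion hc
        have hadd : PySem.Set.add l k = l ++ [k] := by
          unfold PySem.Set.add
          rw [if_neg (by simpa [PySem.Set.contains] using hkl)]
        rw [if_pos hc, hadd]
        apply ih
        · intro s
          rw [PySem.Dict.get?_insert, pvIdxI_append_single]
          by_cases hs : s = k
          · rw [if_pos hs, hs, (pvIdxI_eq_none_iff k l).mpr hkl, if_pos rfl, Option.none_or, h2]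
          · rw [if_neg hs, if_neg (fun h => hs h.symm), Option.or_none, h1]
        · rw [PySem.Dict.size_insert, if_neg (by simp [hc]), h2]
          simp
      · have hct : d.contains k = true := by
          cases h : d.contains k with
          | false => exact absurd h hc
          | true => rfl
        have hkl : k ∈ l := by
          by_contra hmem
          have : d.get? k = none := by rw [h1 k]; exact (pvIdxI_eq_none_iff k l).mpr hmem
          rw [PySem.Dict.contains_eq_isSome_get?, this] at hct
          exact Bool.noConfusion hct
        have hadd : PySem.Set.add l k = l := by
          unfold PySem.Set.add
          rw [if_pos (by simpa [PySem.Set.contains] using hkl)]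
        rw [if_neg hc, hadd]
        exact ih d l h1 h2

-- ---- merge algebra ----
theorem pvMerge_none_right (x : Option (Int × String)) : pvMerge x none = x := by
  cases x <;> rfl

theorem pvMerge_some_some (p q : Int × String) :
    pvMerge (some p) (some q) = if q.1 < p.1 then some q else some p := rfl

theorem pvMerge_assoc (a b c : Option (Int × String)) :
    pvMerge (pvMerge a b) c = pvMerge a (pvMerge b c) := by
  cases a with
  | none => rfl
  | some p =>
    cases b with
    | none => rfl
    | some q =>
      cases c with
      | none => rw [pvMerge_none_right, pvMerge_none_right]
      | some r =>
        rw [pvMerge_some_some p q, pvMerge_some_some q r]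
        by_cases h1 : q.1 < p.1
        · rw [if_pos h1]
          by_cases h2 : r.1 < q.1
          · rw [if_pos h2, pvMerge_some_some, pvMerge_some_some, if_pos h2,
              if_pos (show r.1 < p.1 by omega)]
          · rw [if_neg h2, pvMerge_some_some, pvMerge_some_some, if_neg h2, if_pos h1]
        · rw [if_neg h1]
          by_cases h2 : r.1 < q.1
          · rw [if_pos h2]
          · rw [if_neg h2, pvMerge_some_some, pvMerge_some_some,
              if_neg (show ¬ r.1 < p.1 by omega), if_neg h1]

theorem pvMerge_map_shift (a b : Option (Int × String)) :
    pvMerge (a.map (fun q => (q.1 + 1, q.2))) (b.map (fun q => (q.1 + 1, q.2)))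
      = (pvMerge a b).map (fun q => (q.1 + 1, q.2)) := by
  cases a <;> cases b <;> simp only [pvMerge, Option.map_some, Option.map_none] <;> try rfl
  split_ifs <;> first | rfl | omega

theorem pvBestR_nonneg (g : String → Option Int) (hg : ∀ n r, g n = some r → 0 ≤ r) :
    ∀ (names : List String) (q : Int × String), pvBestR g names = some q → 0 ≤ q.1 := by
  intro names
  induction names with
  | nil => intro q h; simp [pvBestR] at h
  | cons n t ih =>
    intro q h
    simp only [pvBestR] at h
    cases hs : pvSingle g n with
    | none =>
      rw [hs] at h
      cases hb : pvBestR g t with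
      | none => rw [hb] at h; simp [pvMerge] at h
      | some q' =>
        rw [hb] at h
        simp [pvMerge] at h
        exact h ▸ ih q' hb
    | some p =>
      have hp : 0 ≤ p.1 := by
        simp only [pvSingle] at hs
        cases hgn : g n with
        | none => rw [hgn] at hs; simp at hs
        | some r =>
          rw [hgn] at hs
          simp at hs
          have := hg n r hgn
          rw [← hs]
          simpa using this
      rw [hs] at h
      cases hb : pvBestR g t with
      | none => rw [hb] at h; simp [pvMerge] at h; exact h ▸ hp
      | some q' =>
        rw [hb] at h
        simp only [pvMerge] at h
        split_ifs at h with hlt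
        · exact (Option.some_inj.mp h) ▸ ih q' hb
        · exact (Option.some_inj.mp h) ▸ hp

theorem pvBestR_none (g : String → Option Int) (names : List String)
    (h : ∀ n ∈ names, g n = none) : pvBestR g names = none := by
  induction names with
  | nil => rfl
  | cons n t ih =>
    simp only [pvBestR, pvSingle, h n List.mem_cons_self, Option.map_none]
    rw [ih (fun m hm => h m (List.mem_cons_of_mem _ hm))]
    rfl

-- ---- loop-interchange core: the nested candidate-first search equals the rank-scan ----
theorem pv_best_zero (c : String) (rest : List String) (names : List String) :
    ∀ n0, names.find? (fun n => pvNorm n == c) = some n0 →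
      pvBestR (fun n => if c = pvNorm n then some 0 else (pvIdxI (pvNorm n) rest).map (· + 1)) names = some (0, n0) := by
  have hg : ∀ n r, (if c = pvNorm n then some (0:Int) else (pvIdxI (pvNorm n) rest).map (· + 1)) = some r → 0 ≤ r := by
    intro n r h
    by_cases hc : c = pvNorm n
    · rw [if_pos hc] at h; simp at h; omega
    · rw [if_neg hc] at h
      cases ht : pvIdxI (pvNorm n) rest with
      | none => rw [ht] at h; simp at h
      | some r' =>
        rw [ht] at h; simp at h
        have := pvIdxI_nonneg (pvNorm n) rest r' ht
        omega
  induction names with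
  | nil => intro n0 h; simp at h
  | cons n t ih =>
    intro n0 h
    by_cases hc : pvNorm n = c
    · rw [List.find?_cons_of_pos (by simp [hc])] at h
      have hn0 : n0 = n := (Option.some_inj.mp h).symm
      subst hn0
      simp only [pvBestR, pvSingle, if_pos hc.symm, Option.map_some]
      cases hb : pvBestR (fun n => if c = pvNorm n then some 0 else (pvIdxI (pvNorm n) rest).map (· + 1)) t with
      | none => rfl
      | some q =>
        have := pvBestR_nonneg _ hg t q hb
        simp only [pvMerge]
        rw [if_neg (by omega)]
    · rw [List.find?_cons_of_neg (by simp [hc])] at h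
      have ht := ih n0 h
      have hcc : ¬ c = pvNorm n := fun hh => hc hh.symm
      simp only [pvBestR, ht, pvSingle, if_neg hcc]
      cases hr : pvIdxI (pvNorm n) rest with
      | none => rfl
      | some r =>
        have := pvIdxI_nonneg (pvNorm n) rest r hr
        simp only [Option.map_some, pvMerge]
        rw [if_pos (by omega)]

theorem pv_best_shift (c : String) (rest : List String) (names : List String)
    (h : ∀ n ∈ names, pvNorm n ≠ c) :
    pvBestR (fun n => if c = pvNorm n then some 0 else (pvIdxI (pvNorm n) rest).map (· + 1)) names
      = (pvBestR (fun n => pvIdxI (pvNorm n) rest) names).map (fun q => (q.1 + 1, q.2)) := by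
  induction names with
  | nil => rfl
  | cons n t ih =>
    have hn : c ≠ pvNorm n := fun hh => h n List.mem_cons_self hh.symm
    have hsingle : pvSingle (fun n => if c = pvNorm n then some 0 else (pvIdxI (pvNorm n) rest).map (· + 1)) n
        = (pvSingle (fun n => pvIdxI (pvNorm n) rest) n).map (fun q => (q.1 + 1, q.2)) := by
      simp only [pvSingle, if_neg hn]
      cases pvIdxI (pvNorm n) rest <;> rfl
    simp only [pvBestR]
    rw [ih (fun m hm => h m (List.mem_cons_of_mem _ hm)), hsingle, pvMerge_map_shift]

theorem pv_nested (names : List String) : ∀ cands : List String,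
    cands.findSome? (fun kk => names.find? (fun n => pvNorm n == kk))
      = (pvBestR (fun n => pvIdxI (pvNorm n) cands) names).map (·.2) := by
  intro cands
  induction cands with
  | nil =>
    rw [pvBestR_none (fun n => pvIdxI (pvNorm n) []) names (fun n _ => rfl)]
    rfl
  | cons c rest ih =>
    have hgc : (fun n => pvIdxI (pvNorm n) (c :: rest))
        = (fun n => if c = pvNorm n then some 0 else (pvIdxI (pvNorm n) rest).map (· + 1)) := by
      funext n; rfl
    rw [List.findSome?_cons, hgc]
    cases hf : names.find? (fun n => pvNorm n == c) with
    | some n0 =>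
      rw [pv_best_zero c rest names n0 hf]
      rfl
    | none =>
      have hall : ∀ n ∈ names, pvNorm n ≠ c := by
        intro n hn
        have := List.find?_eq_none.mp hf n hn
        simpa using this
      rw [pv_best_shift c rest names hall, ih]
      cases pvBestR (fun n => pvIdxI (pvNorm n) rest) names <;> rfl

-- ---- the triple-state scan decomposes into merge-fold plus fallback-fold ----
theorem pv_scan_eq (g : String → Option Int) (names : List String) :
    ∀ (s : Option (Int × String)) (fb : Option String),
      names.foldl (pvScanStep g) (s.map (·.1), s.map (·.2), fb)
        = ((pvMerge s (pvBestR g names)).map (·.1), (pvMerge s (pvBestR g names)).map (·.2), pvFb names fb) := by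
  induction names with
  | nil =>
    intro s fb
    cases s <;> rfl
  | cons n t ih =>
    intro s fb
    have hstep : pvScanStep g (s.map (·.1), s.map (·.2), fb) n
        = ((pvMerge s (pvSingle g n)).map (·.1), (pvMerge s (pvSingle g n)).map (·.2), pvFbStep fb n) := by
      cases hg : g n with
      | none =>
        cases s <;>
          simp only [pvScanStep, pvSingle, hg, Option.map_none, Option.map_some, pvMerge, pvFbStep] <;>
          split_ifs <;> rfl
      | some r =>
        cases s with
        | none =>
          simp only [pvScanStep, pvSingle, hg, Option.map_none, Option.map_some, pvMerge, pvFbStep]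
          split_ifs <;> rfl
        | some p =>
          simp only [pvScanStep, pvSingle, hg, Option.map_some, pvMerge]
          by_cases hlt : r < p.1
          · simp only [if_pos hlt, pvFbStep]
            split_ifs <;> rfl
          · simp only [if_neg hlt, pvFbStep]
            split_ifs <;> rfl
    simp only [List.foldl_cons, hstep]
    rw [ih (pvMerge s (pvSingle g n)) (pvFbStep fb n)]
    simp only [pvBestR, ← pvMerge_assoc]
    rfl

-- ---- the fallback scan is the first case-insensitive minimum ----
theorem pvFb_eq_min2 (names : List String) : ∀ fb,
    pvFb names fb = (names.filter (fun n => n ≠ "")).foldl pvMin2 fb := by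
  induction names with
  | nil => intro fb; rfl
  | cons n t ih =>
    intro fb
    simp only [pvFb, List.foldl_cons, List.filter_cons]
    by_cases hn : n = ""
    · have : pvFbStep fb n = fb := by
        simp [pvFbStep, hn]
      rw [this]
      simp only [hn]
      rw [if_neg (by simp)]
      exact ih fb
    · have h1 : pvFbStep fb n = pvMin2 fb n := by
        simp [pvFbStep, pvMin2, hn]
      rw [h1]
      rw [if_pos (by simp [hn])]
      simp only [List.foldl_cons]
      exact ih (pvMin2 fb n)

theorem pvMin2_ne_none (fb : Option String) (n : String) : pvMin2 fb n ≠ none := by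
  unfold pvMin2
  split_ifs with h
  · simp
  · cases fb with
    | none => simp at h
    | some f => simp

theorem pvMin2_spec (t : List String) : ∀ fb : Option String,
    (t.foldl pvMin2 fb = none → (t = [] ∧ fb = none)) ∧
    (∀ m, t.foldl pvMin2 fb = some m →
      ((m ∈ t ∨ fb = some m) ∧
       (∀ y ∈ t, PySem.Str.lower m ≤ PySem.Str.lower y) ∧
       (∀ f, fb = some f → PySem.Str.lower m ≤ PySem.Str.lower f))) := by
  induction t with
  | nil =>
    intro fb
    constructor
    · intro h; exact ⟨rfl, h⟩
    · intro m h
      exact ⟨Or.inr h, by simp, fun f hf => by rw [hf] at h; simp at h; rw [h]⟩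
  | cons n t ih =>
    intro fb
    constructor
    · intro h
      exact absurd ((ih (pvMin2 fb n)).1 h).2 (pvMin2_ne_none fb n)
    · intro m h
      simp only [List.foldl_cons] at h
      obtain ⟨hmem, hmin, hfb⟩ := (ih (pvMin2 fb n)).2 m h
      by_cases hcond : (fb.all fun f => decide (PySem.Str.lower n < PySem.Str.lower f)) = true
      · have hfb' : pvMin2 fb n = some n := by unfold pvMin2; rw [if_pos hcond]
        rw [hfb'] at hmem hfb
        have hmn : PySem.Str.lower m ≤ PySem.Str.lower n := hfb n rfl
        refine ⟨?_, ?_, ?_⟩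
        · rcases hmem with hm | hm
          · exact Or.inl (List.mem_cons_of_mem _ hm)
          · exact Or.inl (by simp [Option.some_inj.mp hm])
        · intro y hy
          rcases List.mem_cons.mp hy with hy | hy
          · rw [hy]; exact hmn
          · exact hmin y hy
        · intro f hf
          rw [hf] at hcond
          simp only [Option.all_some, decide_eq_true_eq] at hcond
          exact le_trans hmn (le_of_lt hcond)
      · have hfb' : pvMin2 fb n = fb := by unfold pvMin2; rw [if_neg hcond]
        rw [hfb'] at hmem hfb
        obtain ⟨f0, hf0⟩ : ∃ f0, fb = some f0 := by
          cases fb with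
          | none => simp at hcond
          | some f => exact ⟨f, rfl⟩
        have hnle : PySem.Str.lower f0 ≤ PySem.Str.lower n := by
          rw [hf0] at hcond
          simp only [Option.all_some, decide_eq_true_eq] at hcond
          exact le_of_not_gt hcond
        have hmf0 : PySem.Str.lower m ≤ PySem.Str.lower f0 := hfb f0 hf0
        refine ⟨?_, ?_, hfb⟩
        · rcases hmem with hm | hm
          · exact Or.inl (List.mem_cons_of_mem _ hm)
          · exact Or.inr hm
        · intro y hy
          rcases List.mem_cons.mp hy with hy | hy
          · rw [hy]; exact le_trans hmf0 hnle
          · exact hmin y hy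

theorem pvFb_eq_min? (names : List String)
    (hnd : ((names.filter (fun n => n ≠ "")).map (fun v => PySem.Str.lower v)).Nodup) :
    pvFb names none = PySem.List.min? (names.filter (fun n => n ≠ "")) (fun v => PySem.Str.lower v) := by
  rw [pvFb_eq_min2]
  cases ht : (names.filter (fun n => n ≠ "")).foldl pvMin2 none with
  | none =>
    have := ((pvMin2_spec _ none).1 ht).1
    rw [this]
    exact ((PySem.List.min?_eq_none_iff _ _).mpr rfl).symm
  | some m =>
    obtain ⟨hmem, hmin, _⟩ := (pvMin2_spec _ none).2 m ht
    have hm : m ∈ names.filter (fun n => n ≠ "") := by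
      rcases hmem with h | h
      · exact h
      · simp at h
    obtain ⟨m', hm'⟩ : ∃ m', PySem.List.min? (names.filter (fun n => n ≠ "")) (fun v => PySem.Str.lower v) = some m' := by
      cases hq : PySem.List.min? (names.filter (fun n => n ≠ "")) (fun v => PySem.Str.lower v) with
      | none =>
        have := (PySem.List.min?_eq_none_iff _ _).mp hq
        rw [this] at hm
        simp at hm
      | some m' => exact ⟨m', rfl⟩
    rw [hm']
    have hm'_mem := PySem.List.min?_mem hm'
    have h1 : PySem.Str.lower m ≤ PySem.Str.lower m' := hmin m' hm'_mem
    have h2 : PySem.Str.lower m' ≤ PySem.Str.lower m := PySem.List.min?_isMin hm' m hm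
    have : m = m' := List.inj_on_of_nodup_map hnd hm hm'_mem (le_antisymm h1 h2)
    rw [this]

-- ---- reductions of the two ports to the shared notions ----
theorem pv_A_eq (ms : List (String × List (String × Int))) (params tags : List (String × String)) :
    resolve_primary_metric_py ms params tags =
      if ms.isEmpty then none else
      match pvLossKeys.findSome? (fun k => (pvCandF params tags k).bind (pvMatchF (PySem.Set.ofList (ms.map (·.1))))) with
      | some m => some m
      | none => (pvSortedMetricNames (PySem.Set.ofList (ms.map (·.1)))).head? := by
  simp only [resolve_primary_metric_py]
  by_cases hms : ms.isEmpty
  · rw [if_pos hms, if_pos hms]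
  · rw [if_neg hms, if_neg hms]
    have hc1 : (fun (acc : List String) key =>
        match pvOrGet params tags key with
        | some c => if c ≠ "" then acc ++ [c] else acc
        | none => acc)
      = pvAppendStep (pvCandF params tags) := by
      funext acc k
      unfold pvAppendStep pvCandF
      cases h : pvOrGet params tags k with
      | none => rfl
      | some c =>
        by_cases hce : c = ""
        · simp [hce]
        · simp [hce]
    have hc2 : (fun (acc : Option String) candidate =>
        match acc with
        | some _ => acc
        | none =>
          match pvMatchMetricName (PySem.Set.ofList (ms.map (·.1))) (some candidate) with
          | some m => if m ≠ "" then some m else none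
          | none => none)
      = pvEarlyStep (pvMatchF (PySem.Set.ofList (ms.map (·.1)))) := by
      funext acc c
      unfold pvEarlyStep pvMatchF
      cases acc <;> rfl
    rw [hc1, pv_foldl_append_filterMap, List.nil_append, hc2, pv_foldl_early, pv_findSome?_filterMap]
    cases pvLossKeys.findSome? (fun k => (pvCandF params tags k).bind (pvMatchF (PySem.Set.ofList (ms.map (·.1))))) with
    | some m => rfl
    | none => cases pvSortedMetricNames (PySem.Set.ofList (ms.map (·.1))) <;> rfl

theorem pv_bind_matchF (params tags : List (String × String)) (names : List String) (k : String) :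
    (pvCandF params tags k).bind (pvMatchF names)
      = (pvEF params tags k).bind (fun kk => names.find? (fun n => pvNorm n == kk)) := by
  cases hc : pvCandF params tags k with
  | none => unfold pvEF; rw [hc]; rfl
  | some c =>
    have hce : c ≠ "" := by
      unfold pvCandF at hc
      cases h : pvOrGet params tags k with
      | none => rw [h] at hc; simp at hc
      | some v =>
        rw [h] at hc
        by_cases hv : v = ""
        · simp [hv] at hc
        · simp [hv] at hc; rw [← hc]; exact hv
    have hef : pvEF params tags k = (if pvNorm c = "" then none else some (pvNorm c)) := by
      unfold pvEF; rw [hc, Option.bind_some]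
    rw [hef]
    by_cases htk : pvNorm c = ""
    · rw [if_pos htk]
      show pvMatchF names c = (none : Option String).bind (fun kk => names.find? (fun n => pvNorm n == kk))
      unfold pvMatchF pvMatchMetricName
      show (match (if c = "" then none else if pvNorm c = "" then none
                   else names.find? (fun name => pvNorm name == pvNorm c)) with
            | some m => if m ≠ "" then some m else none
            | none => none)
          = (none : Option String).bind (fun kk => names.find? (fun n => pvNorm n == kk))
      rw [if_neg hce, if_pos htk, Option.bind_none]
    · rw [if_neg htk]
      show pvMatchF names c = names.find? (fun n => pvNorm n == pvNorm c)
      unfold pvMatchF pvMatchMetricName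
      show (match (if c = "" then none else if pvNorm c = "" then none
                   else names.find? (fun name => pvNorm name == pvNorm c)) with
            | some m => if m ≠ "" then some m else none
            | none => none)
          = names.find? (fun n => pvNorm n == pvNorm c)
      rw [if_neg hce, if_neg htk]
      cases hf : names.find? (fun name => pvNorm name == pvNorm c) with
      | none => rfl
      | some m =>
        have hpm : pvNorm m = pvNorm c := by
          have := List.find?_some hf
          simpa using this
        have hne : m ≠ "" := by
          intro hm; rw [hm, pvNorm_empty] at hpm; exact htk hpm.symm
        simp [hne]

theorem pv_B_eq (ms : List (String × List (String × Int))) (params tags : List (String × String)) :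
    resolve_primary_metric_py_alt ms params tags =
      match pvBestR (fun n => pvIdxI (pvNorm n) (PySem.Set.ofList (pvKS params tags))) (PySem.Set.ofList (ms.map (·.1))) with
      | some q => some q.2
      | none => pvFb (PySem.Set.ofList (ms.map (·.1))) none := by
  simp only [resolve_primary_metric_py_alt]
  have hrank : (fun (d : PySem.Dict String Int) key =>
      match pvOrGet params tags key with
      | some candidate =>
        if candidate ≠ "" then
          if pvNorm candidate ≠ "" ∧ d.contains (pvNorm candidate) = false
          then d.insert (pvNorm candidate) (d.size : Int) else d
        else d
      | none => d) = pvRankStep (pvEF params tags) := by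
    funext d key
    unfold pvRankStep pvEF pvCandF
    cases h : pvOrGet params tags key with
    | none => rfl
    | some c =>
      show (if c ≠ "" then (if pvNorm c ≠ "" ∧ d.contains (pvNorm c) = false then d.insert (pvNorm c) (d.size : Int) else d) else d)
          = (match (if c ≠ "" then some c else none).bind (fun c => if pvNorm c = "" then none else some (pvNorm c)) with
             | some k => if d.contains k = false then d.insert k (d.size : Int) else d
             | none => d)
      by_cases hce : c = ""
      · have hnn : ¬ c ≠ "" := fun hh => hh hce
        rw [if_neg hnn, if_neg hnn, Option.bind_none]
      · have hcc : c ≠ "" := hce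
        rw [if_pos hcc, if_pos hcc, Option.bind_some]
        by_cases htk : pvNorm c = ""
        · rw [if_pos htk, if_neg (show ¬ (pvNorm c ≠ "" ∧ d.contains (pvNorm c) = false) from fun hh => hh.1 htk)]
        · rw [if_neg htk]
          show (if pvNorm c ≠ "" ∧ d.contains (pvNorm c) = false then d.insert (pvNorm c) (d.size : Int) else d)
              = (if d.contains (pvNorm c) = false then d.insert (pvNorm c) (d.size : Int) else d)
          by_cases hcon : d.contains (pvNorm c) = false
          · rw [if_pos ⟨htk, hcon⟩, if_pos hcon]
          · rw [if_neg (fun hh => hcon hh.2), if_neg hcon]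
  rw [hrank]
  set ranks := pvLossKeys.foldl (pvRankStep (pvEF params tags)) PySem.Dict.empty with hranks
  have hchar := pv_ranks (pvEF params tags) pvLossKeys PySem.Dict.empty []
    (fun s => by rw [PySem.Dict.get?_empty]; rfl) (by rfl)
  have hget : ∀ s, ranks.get? s = pvIdxI s (PySem.Set.ofList (pvKS params tags)) := by
    intro s
    rw [hranks]
    rw [hchar.1 s]
    unfold pvKS
    rw [PySem.Set.ofList_eq_foldl]
  have hscan : (fun (st : Option Int × Option String × Option String) name =>
      let st1 : Option Int × Option String × Option String :=
        match ranks.get? (pvNorm name), st.1 with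
        | some r, none => (some r, some name, st.2.2)
        | some r, some b => if r < b then (some r, some name, st.2.2) else st
        | none, _ => st
      if name ≠ "" ∧ (st1.2.2.all fun f => decide (PySem.Str.lower name < PySem.Str.lower f)) = true
      then (st1.1, st1.2.1, some name) else st1)
    = pvScanStep (fun n => ranks.get? (pvNorm n)) := by
    funext st name
    rfl
  rw [hscan]
  have h0 : ((none : Option Int), (none : Option String), (none : Option String))
      = ((none : Option (Int × String)).map (·.1), (none : Option (Int × String)).map (·.2), (none : Option String)) := rfl
  rw [h0, pv_scan_eq]
  have hgfun : (fun n => ranks.get? (pvNorm n)) = (fun n => pvIdxI (pvNorm n) (PySem.Set.ofList (pvKS params tags))) := by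
    funext n; exact hget (pvNorm n)
  rw [hgfun]
  cases pvBestR (fun n => pvIdxI (pvNorm n) (PySem.Set.ofList (pvKS params tags))) (PySem.Set.ofList (ms.map (·.1))) with
  | none => rfl
  | some q => rfl

-- ---- main equivalence ----
theorem pv_main (ms : List (String × List (String × Int))) (params tags : List (String × String))
    (hpre : ((PySem.Set.ofList (ms.map (·.1))).map (fun s => PySem.Str.lower s)).Nodup) :
    resolve_primary_metric_py ms params tags = resolve_primary_metric_py_alt ms params tags := by
  rw [pv_A_eq, pv_B_eq]
  by_cases hms : ms.isEmpty
  · rw [if_pos hms]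
    have hraw : ms.map (·.1) = [] := by cases ms with | nil => rfl | cons a t => simp at hms
    rw [hraw]
    rfl
  · rw [if_neg hms]
    have hbind : (fun k => (pvCandF params tags k).bind (pvMatchF (PySem.Set.ofList (ms.map (·.1)))))
        = (fun k => (pvEF params tags k).bind (fun kk => (PySem.Set.ofList (ms.map (·.1))).find? (fun n => pvNorm n == kk))) :=
      funext (pv_bind_matchF params tags _)
    rw [hbind]
    rw [show pvLossKeys.findSome? (fun k => (pvEF params tags k).bind (fun kk => (PySem.Set.ofList (ms.map (·.1))).find? (fun n => pvNorm n == kk)))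
        = (pvKS params tags).findSome? (fun kk => (PySem.Set.ofList (ms.map (·.1))).find? (fun n => pvNorm n == kk))
      from (pv_findSome?_filterMap (pvEF params tags) _ pvLossKeys).symm]
    rw [← pv_findSome?_ofList (fun kk => (PySem.Set.ofList (ms.map (·.1))).find? (fun n => pvNorm n == kk)) (pvKS params tags)]
    rw [pv_nested (PySem.Set.ofList (ms.map (·.1))) (PySem.Set.ofList (pvKS params tags))]
    cases pvBestR (fun n => pvIdxI (pvNorm n) (PySem.Set.ofList (pvKS params tags))) (PySem.Set.ofList (ms.map (·.1))) with
    | some q => rfl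
    | none =>
      simp only [Option.map_none]
      have h1 : (PySem.Set.ofList (ms.map (·.1))).filter (fun n => n ≠ "")
          = PySem.Set.ofList ((ms.map (·.1)).filter (fun n => n ≠ "")) :=
        pv_filter_ofList _ _
      have hnd : (((PySem.Set.ofList (ms.map (·.1))).filter (fun n => n ≠ "")).map (fun v => PySem.Str.lower v)).Nodup := by
        have hsub : ((PySem.Set.ofList (ms.map (·.1))).filter (fun n => n ≠ "")).Sublist (PySem.Set.ofList (ms.map (·.1))) :=
          List.filter_sublist
        exact hpre.sublist (hsub.map _)
      have hfall : (pvSortedMetricNames (PySem.Set.ofList (ms.map (·.1)))).head?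
          = PySem.List.min? ((PySem.Set.ofList (ms.map (·.1))).filter (fun n => n ≠ "")) (fun v => PySem.Str.lower v) := by
        unfold pvSortedMetricNames
        have h2 : PySem.Set.ofList ((PySem.Set.ofList (ms.map (·.1))).filter (fun n => n ≠ ""))
            = (PySem.Set.ofList (ms.map (·.1))).filter (fun n => n ≠ "") := by
          rw [h1]
          rw [PySem.Set.ofList_eq_self_of_nodup _ (PySem.Set.nodup_ofList _)]
        rw [h2]
        exact pv_head_sorted_eq_min? _ hnd
      rw [hfall, pvFb_eq_min? _ hnd]

-- ===== VERDICT (by name: the statement is the Claim_ definition above) =====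
theorem resolve_primary_metric_py_spec : Claim_equal_resolve_primary_metric_py := by
  unfold Claim_equal_resolve_primary_metric_py
  intro metric_summary params tags _ hpre
  unfold Spec_resolve_primary_metric_py
  exact pv_main metric_summary params tags hpre
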